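-- pv_equiv track=rewrite | github.com/dielfrag13/snippets | python/design/robot_vacuum_project/rooms.py | concentric_rooms
-- ===== SOURCE A (Python) =====
-- from typing import Dict, List, Optional, Tuple
--
-- Grid = List[List[str]]
--
-- def concentric_rooms(layers: int = 3, layer_spacing: int = 2) -> Grid:
--     """Create nested square rooms (concentric walls) useful for path planning.
--
--     layers: number of enclosed layers (>=1).
--     layer_spacing: spacing between walls.
--     """
--     size = 2 + layers * (layer_spacing + 1) * 2
--     grid = [["." for _ in range(size)] for _ in range(size)]
--     # fill with open then add concentric walls
--     for layer in range(layers):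
--         offset = 1 + layer * (layer_spacing + 1)
--         max_idx = size - 1 - offset
--         for i in range(offset, max_idx + 1):
--             grid[offset][i] = "#"
--             grid[max_idx][i] = "#"
--             grid[i][offset] = "#"
--             grid[i][max_idx] = "#"
--     return grid
-- ===== SOURCE B (Python) =====
-- def concentric_rooms(layers: int = 3, layer_spacing: int = 2):
--     """Same grid via a closed-form per-cell ring-depth test: cell (i, j) has depth
--     m = min(i, j, size-1-i, size-1-j) and is a wall iff m >= 1, (m-1) % (spacing+1) == 0
--     and (m-1) // (spacing+1) < layers; the test is tabulated once per depth."""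
--     size = 2 + layers * (layer_spacing + 1) * 2
--     d = layer_spacing + 1
--     w = ["#" if m >= 1 and (m - 1) % d == 0 and (m - 1) // d < layers else "."
--          for m in range((size + 1) // 2)]
--     D = [min(j, size - 1 - j) for j in range(size)]
--     grid = []
--     for i in range(size):
--         mi = min(i, size - 1 - i)
--         ci = w[mi]
--         grid.append([w[dj] if dj < mi else ci for dj in D])
--     return grid
-- ===== Notes on version B (the rewrite author's own statement) =====
-- stated objective: alternative
-- what changed: B computes the grid size by the same formula but fills every cell in one flat per-cell scan using a closed-form ring-depth test (m = min distance to the border; wall iff m >= 1, (m-1) divisible by spacing+1 and (m-1)//(spacing+1) < layers), instead of A's imperative per-layer perimeter drawing with four indexed assignments per step.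
import Mathlib
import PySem

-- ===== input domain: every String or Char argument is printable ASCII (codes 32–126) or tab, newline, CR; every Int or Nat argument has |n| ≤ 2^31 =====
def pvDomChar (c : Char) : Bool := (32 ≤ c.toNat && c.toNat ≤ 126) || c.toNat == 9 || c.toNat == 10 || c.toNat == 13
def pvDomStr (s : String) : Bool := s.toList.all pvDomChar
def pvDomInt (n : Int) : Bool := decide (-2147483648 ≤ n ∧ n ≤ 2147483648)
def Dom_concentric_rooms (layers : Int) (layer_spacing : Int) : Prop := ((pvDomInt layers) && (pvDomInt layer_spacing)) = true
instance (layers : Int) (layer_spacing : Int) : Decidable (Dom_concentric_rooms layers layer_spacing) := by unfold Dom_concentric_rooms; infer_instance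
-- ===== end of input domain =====

-- B fills each cell from a closed-form ring-depth test instead of drawing wall perimeters
-- layer by layer (alternative decomposition; same asymptotic cost).

-- ===== PORT A =====
-- grid[r][c] = v.  pyGetD/pySetD are the total forms of Python's indexing/assignment;
-- every subscript A executes is in range (proved below), so this is exact on executed paths.
def pvSetCell (g : List (List String)) (r c : Int) (v : String) : List (List String) :=
  PySem.List.pySetD g r (PySem.List.pySetD (PySem.List.pyGetD g r []) c v)

-- the four assignments of A's inner loop body
def pvDraw (off mx : Int) (g : List (List String)) (i : Int) : List (List String) :=
  pvSetCell (pvSetCell (pvSetCell (pvSetCell g off i "#") mx i "#") i off "#") i mx "#"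

-- one iteration of A's outer loop (one concentric wall)
def pvLayer (layer_spacing size : Int) (grid : List (List String)) (layer : Int) : List (List String) :=
  let offset := 1 + layer * (layer_spacing + 1)
  let max_idx := size - 1 - offset
  (PySem.List.pyRange offset (max_idx + 1) 1).foldl (pvDraw offset max_idx) grid

def concentric_rooms (layers : Int) (layer_spacing : Int) : List (List String) :=
  let size := 2 + layers * (layer_spacing + 1) * 2
  let grid := (PySem.List.pyRange 0 size 1).map
    (fun _ => (PySem.List.pyRange 0 size 1).map (fun _ => "."))
  (PySem.List.pyRange 0 layers 1).foldl (pvLayer layer_spacing size) grid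

-- ===== PORT B =====
def concentric_rooms_alt (layers : Int) (layer_spacing : Int) : List (List String) :=
  let size := 2 + layers * (layer_spacing + 1) * 2
  let d := layer_spacing + 1
  let w := (PySem.List.pyRange 0 (PySem.Int.floordiv (size + 1) 2) 1).map (fun m =>
    if 1 ≤ m ∧ PySem.Int.mod (m - 1) d = 0 ∧ PySem.Int.floordiv (m - 1) d < layers
    then "#" else ".")
  let dd := (PySem.List.pyRange 0 size 1).map (fun j => min j (size - 1 - j))
  (PySem.List.pyRange 0 size 1).map (fun i =>
    let mi := min i (size - 1 - i)
    let ci := PySem.List.pyGetD w mi "."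
    dd.map (fun dj => if dj < mi then PySem.List.pyGetD w dj "." else ci))

-- ===== PRECONDITION & SPEC =====
def Spec_concentric_rooms (layers : Int) (layer_spacing : Int) (out : List (List String)) : Prop := out = concentric_rooms_alt layers layer_spacing
instance (layers : Int) (layer_spacing : Int) (out : List (List String)) : Decidable (Spec_concentric_rooms layers layer_spacing out) := by unfold Spec_concentric_rooms; infer_instance

-- ===== CLAIM (what is proved, stated in full; the proofs are below) =====
def Claim_equal_concentric_rooms : Prop := ∀ (layers : Int) (layer_spacing : Int), Dom_concentric_rooms layers layer_spacing → Spec_concentric_rooms layers layer_spacing (concentric_rooms layers layer_spacing)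

-- ===== LEMMAS AND PROOFS =====

-- the value of cell (i, j) of a grid, Int indices
def cellZ (g : List (List String)) (i j : Int) : String :=
  PySem.List.pyGetD (PySem.List.pyGetD g i []) j "."

def PShape (S : Int) (g : List (List String)) : Prop :=
  (g.length : Int) = S ∧ ∀ row ∈ g, (row.length : Int) = S

-- the per-cell closed form, used as a bridge between the two ports
def pvPlain (layers : Int) (layer_spacing : Int) : List (List String) :=
  let size := 2 + layers * (layer_spacing + 1) * 2
  let d := layer_spacing + 1
  (PySem.List.pyRange 0 size 1).map (fun i =>
    (PySem.List.pyRange 0 size 1).map (fun j =>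
      let m := min (min i j) (min (size - 1 - i) (size - 1 - j))
      if 1 ≤ m ∧ PySem.Int.mod (m - 1) d = 0 ∧ PySem.Int.floordiv (m - 1) d < layers
      then "#" else "."))

lemma pvSetCell_eq (g : List (List String)) {r : Int} (c : Int) (v : String)
    (hr0 : 0 ≤ r) (hc0 : 0 ≤ c) (hrl : r.toNat < g.length) :
    pvSetCell g r c v = g.set r.toNat ((g[r.toNat]).set c.toNat v) := by
  unfold pvSetCell
  rw [PySem.List.pyGetD_eq_getElem _ _ hr0 (by omega),
      PySem.List.pySetD_of_nonneg _ _ hc0,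
      PySem.List.pySetD_of_nonneg _ _ hr0]

lemma pvSetCell_shape {S : Int} {g : List (List String)} (hg : PShape S g)
    {r c : Int} (hr0 : 0 ≤ r) (hrS : r < S) (hc0 : 0 ≤ c) (v : String) :
    PShape S (pvSetCell g r c v) := by
  obtain ⟨h1, h2⟩ := hg
  have hrl : r.toNat < g.length := by omega
  rw [pvSetCell_eq g c v hr0 hc0 hrl]
  refine ⟨by simpa using h1, ?_⟩
  intro row hrow
  rcases List.mem_or_eq_of_mem_set hrow with hmem | heq
  · exact h2 row hmem
  · subst heq
    simpa using h2 _ (List.getElem_mem hrl)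

lemma pvSetCell_cell {S : Int} {g : List (List String)} (hg : PShape S g)
    {r c i j : Int} (hr0 : 0 ≤ r) (hrS : r < S) (hc0 : 0 ≤ c)
    (hi0 : 0 ≤ i) (hiS : i < S) (hj0 : 0 ≤ j) (hjS : j < S) (v : String) :
    cellZ (pvSetCell g r c v) i j = if i = r ∧ j = c then v else cellZ g i j := by
  obtain ⟨h1, h2⟩ := hg
  have hrl : r.toNat < g.length := by omega
  have hil : i.toNat < g.length := by omega
  have hrowlen : ∀ (k : Nat) (hk : k < g.length), (g[k].length : Int) = S := by
    intro k hk; exact h2 _ (List.getElem_mem hk)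
  rw [pvSetCell_eq g c v hr0 hc0 hrl]
  unfold cellZ
  rw [PySem.List.pyGetD_eq_getElem _ _ hi0 (by simpa using (show i < (g.length:Int) by omega)),
      PySem.List.pyGetD_eq_getElem _ _ hi0 (by exact_mod_cast (show i < (g.length:Int) by omega))]
  rw [List.getElem_set]
  by_cases hir : r.toNat = i.toNat
  · have hir' : i = r := by omega
    simp only [if_pos hir]
    have hrS' := hrowlen r.toNat hrl
    have hiS' := hrowlen i.toNat hil
    have hsl : ((g[r.toNat].set c.toNat v).length : Int) = S := by
      rw [List.length_set]; exact hrS'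
    rw [PySem.List.pyGetD_eq_getElem _ _ hj0 (by omega),
        PySem.List.pyGetD_eq_getElem _ _ hj0 (by omega)]
    rw [List.getElem_set]
    by_cases hjc : c.toNat = j.toNat
    · have : j = c := by omega
      simp [hir', this, hjc]
    · have : ¬ (j = c) := by omega
      simp [hir', this, hjc]
  · have : ¬ (i = r) := by omega
    simp [this, hir]

lemma inner_char (S off mx : Int) (hoff : 0 ≤ off) (hmxS : mx < S) :
    ∀ (n : Nat) (a : Int) (g : List (List String)), off ≤ a → (mx + 1 - a).toNat = n →
    PShape S g →
    PShape S ((PySem.List.pyRange a (mx + 1) 1).foldl (pvDraw off mx) g) ∧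
    ∀ i j, 0 ≤ i → i < S → 0 ≤ j → j < S →
      cellZ ((PySem.List.pyRange a (mx + 1) 1).foldl (pvDraw off mx) g) i j =
        if ((i = off ∨ i = mx) ∧ a ≤ j ∧ j ≤ mx) ∨ ((j = off ∨ j = mx) ∧ a ≤ i ∧ i ≤ mx)
        then "#" else cellZ g i j := by
  intro n
  induction n with
  | zero =>
    intro a g ha hn hg
    rw [PySem.List.pyRange_one_eq_nil (by omega)]
    simp only [List.foldl_nil]
    refine ⟨hg, ?_⟩
    intro i j _ _ _ _
    rw [if_neg]
    rintro (⟨_, h1, h2⟩ | ⟨_, h1, h2⟩) <;> omega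
  | succ n ih =>
    intro a g ha hn hg
    rw [PySem.List.pyRange_one_cons (show a < mx + 1 by omega)]
    simp only [List.foldl_cons]
    have hamx : a ≤ mx := by omega
    have ha0 : 0 ≤ a := le_trans hoff ha
    have hmx0 : 0 ≤ mx := le_trans ha0 hamx
    have hoffS : off < S := by omega
    have haS : a < S := by omega
    have s1 := pvSetCell_shape hg hoff hoffS ha0 "#"
    have s2 := pvSetCell_shape s1 hmx0 hmxS ha0 "#"
    have s3 := pvSetCell_shape s2 ha0 haS hoff "#"
    have hg1 : PShape S (pvDraw off mx g a) := pvSetCell_shape s3 ha0 haS hmx0 "#"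
    obtain ⟨ihS, ihC⟩ := ih (a + 1) (pvDraw off mx g a) (by omega) (by omega) hg1
    refine ⟨ihS, ?_⟩
    intro i j hi0 hiS hj0 hjS
    rw [ihC i j hi0 hiS hj0 hjS]
    have hdraw : cellZ (pvDraw off mx g a) i j =
        if (i = off ∧ j = a) ∨ (i = mx ∧ j = a) ∨ (i = a ∧ j = off) ∨ (i = a ∧ j = mx)
        then "#" else cellZ g i j := by
      unfold pvDraw
      rw [pvSetCell_cell s3 ha0 haS hmx0 hi0 hiS hj0 hjS,
          pvSetCell_cell s2 ha0 haS hoff hi0 hiS hj0 hjS,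
          pvSetCell_cell s1 hmx0 hmxS ha0 hi0 hiS hj0 hjS,
          pvSetCell_cell hg hoff hoffS ha0 hi0 hiS hj0 hjS]
      split_ifs <;> first | rfl | omega
    rw [hdraw]
    split_ifs <;> first | rfl | omega

lemma ring_iff_min (S off mx i j : Int) (h2 : off ≤ mx) (h3 : mx = S - 1 - off) :
    (((i = off ∨ i = mx) ∧ off ≤ j ∧ j ≤ mx) ∨ ((j = off ∨ j = mx) ∧ off ≤ i ∧ i ≤ mx)) ↔
    min (min i j) (min (S - 1 - i) (S - 1 - j)) = off := by omega

lemma outer_char (sp L S : Int) (hd : 1 ≤ sp + 1) (hS : S = 2 + L * (sp + 1) * 2) :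
    ∀ (n : Nat) (l0 : Int) (g : List (List String)), 0 ≤ l0 → (L - l0).toNat = n →
    PShape S g →
    PShape S ((PySem.List.pyRange l0 L 1).foldl (pvLayer sp S) g) ∧
    ∀ i j, 0 ≤ i → i < S → 0 ≤ j → j < S →
      cellZ ((PySem.List.pyRange l0 L 1).foldl (pvLayer sp S) g) i j =
        if ∃ l ∈ PySem.List.pyRange l0 L 1,
             min (min i j) (min (S - 1 - i) (S - 1 - j)) = 1 + l * (sp + 1)
        then "#" else cellZ g i j := by
  intro n
  induction n with
  | zero =>
    intro l0 g hl0 hn hg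
    rw [PySem.List.pyRange_one_eq_nil (by omega)]
    simp only [List.foldl_nil]
    exact ⟨hg, fun i j _ _ _ _ => by simp⟩
  | succ n ih =>
    intro l0 g hl0 hn hg
    have hl0L : l0 < L := by omega
    rw [PySem.List.pyRange_one_cons hl0L]
    simp only [List.foldl_cons]
    have hP0 : (0:Int) ≤ l0 * (sp + 1) := mul_nonneg hl0 (by omega)
    have hkey : (1:Int) ≤ (L - l0) * (sp + 1) := by
      calc (1:Int) = 1 * 1 := by ring
      _ ≤ (L - l0) * (sp + 1) := by
        apply mul_le_mul (by omega) hd (by norm_num) (by omega)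
    have hexp : (L - l0) * (sp + 1) = L * (sp + 1) - l0 * (sp + 1) := by ring
    have hSL : S = 2 + L * (sp + 1) * 2 := hS
    -- this layer's offsets
    have hoff0 : (0:Int) ≤ 1 + l0 * (sp + 1) := by linarith
    have hoffmx : 1 + l0 * (sp + 1) ≤ S - 1 - (1 + l0 * (sp + 1)) := by linarith
    have hmxS : S - 1 - (1 + l0 * (sp + 1)) < S := by linarith
    have hlayer :
        pvLayer sp S g l0 =
          (PySem.List.pyRange (1 + l0 * (sp + 1)) (S - 1 - (1 + l0 * (sp + 1)) + 1) 1).foldl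
            (pvDraw (1 + l0 * (sp + 1)) (S - 1 - (1 + l0 * (sp + 1)))) g := rfl
    obtain ⟨s1, c1⟩ := inner_char S (1 + l0 * (sp + 1)) (S - 1 - (1 + l0 * (sp + 1))) hoff0 hmxS
      (S - 1 - (1 + l0 * (sp + 1)) + 1 - (1 + l0 * (sp + 1))).toNat (1 + l0 * (sp + 1)) g
      le_rfl rfl hg
    rw [hlayer]
    obtain ⟨s2, c2⟩ := ih (l0 + 1) _ (by omega) (by omega) s1
    refine ⟨s2, ?_⟩
    intro i j hi0 hiS hj0 hjS
    rw [c2 i j hi0 hiS hj0 hjS, c1 i j hi0 hiS hj0 hjS]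
    simp only [ring_iff_min S (1 + l0 * (sp + 1)) (S - 1 - (1 + l0 * (sp + 1))) i j hoffmx rfl]
    have hiff :
        (∃ l ∈ l0 :: PySem.List.pyRange (l0 + 1) L 1,
            min (min i j) (min (S - 1 - i) (S - 1 - j)) = 1 + l * (sp + 1)) ↔
        ((∃ l ∈ PySem.List.pyRange (l0 + 1) L 1,
            min (min i j) (min (S - 1 - i) (S - 1 - j)) = 1 + l * (sp + 1)) ∨
         min (min i j) (min (S - 1 - i) (S - 1 - j)) = 1 + l0 * (sp + 1)) := by
      constructor
      · rintro ⟨l, hmem, hM⟩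
        rcases List.mem_cons.mp hmem with rfl | hmem'
        · exact Or.inr hM
        · exact Or.inl ⟨l, hmem', hM⟩
      · rintro (⟨l, hm, hM⟩ | hM)
        · exact ⟨l, List.mem_cons_of_mem _ hm, hM⟩
        · exact ⟨l0, List.mem_cons_self, hM⟩
    by_cases h1 : ∃ l ∈ PySem.List.pyRange (l0 + 1) L 1,
        min (min i j) (min (S - 1 - i) (S - 1 - j)) = 1 + l * (sp + 1)
    · rw [if_pos h1, if_pos (hiff.mpr (Or.inl h1))]
    · rw [if_neg h1]
      by_cases h2 : min (min i j) (min (S - 1 - i) (S - 1 - j)) = 1 + l0 * (sp + 1)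
      · rw [if_pos h2, if_pos (hiff.mpr (Or.inr h2))]
      · rw [if_neg h2, if_neg (fun hc => (hiff.mp hc).elim h1 h2)]

lemma foldl_fix {A B : Type} (f : A -> B -> A) (c : A) (h : forall i, f c i = c) :
    forall l : List B, l.foldl f c = c := by
  intro l; induction l with
  | nil => rfl
  | cons x xs ih => simp [List.foldl, h x, ih]

lemma m_bound (S i j : Int) :
    min (min i j) (min (S - 1 - i) (S - 1 - j)) * 2 ≤ S - 1 := by omega

lemma exists_layer_iff (d L M : Int) (hd : 1 ≤ d) :
    (∃ l, 0 ≤ l ∧ l < L ∧ M = 1 + l * d) ↔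
    (1 ≤ M ∧ PySem.Int.mod (M - 1) d = 0 ∧ PySem.Int.floordiv (M - 1) d < L) := by
  constructor
  · rintro ⟨l, h0, hlL, rfl⟩
    have hld : 0 ≤ l * d := mul_nonneg h0 (by omega)
    have hfl : PySem.Int.floordiv (1 + l * d - 1) d = l := by
      rw [PySem.Int.floordiv_eq_iff_of_pos (by omega)]
      have hexp : (l + 1) * d = l * d + d := by ring
      constructor
      · linarith
      · linarith
    refine ⟨by omega, ?_, ?_⟩
    · rw [PySem.Int.mod_eq_zero_iff_dvd]; exact ⟨l, by ring⟩
    · rw [hfl]; exact hlL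
  · rintro ⟨h1, hmod, hdiv⟩
    have hqr := PySem.Int.floordiv_mul_add_mod (M - 1) d
    rw [hmod, add_zero] at hqr
    refine ⟨PySem.Int.floordiv (M - 1) d, ?_, hdiv, by linarith⟩
    by_contra hq
    have : PySem.Int.floordiv (M - 1) d * d ≤ (-1) * d :=
      mul_le_mul_of_nonneg_right (by omega) (by omega)
    linarith

lemma test_false_negd (sp L S i j : Int) (hd : sp + 1 ≤ -1)
    (hS : S = 2 + L * (sp + 1) * 2) :
    ¬ (1 ≤ min (min i j) (min (S - 1 - i) (S - 1 - j)) ∧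
       PySem.Int.mod (min (min i j) (min (S - 1 - i) (S - 1 - j)) - 1) (sp + 1) = 0 ∧
       PySem.Int.floordiv (min (min i j) (min (S - 1 - i) (S - 1 - j)) - 1) (sp + 1) < L) := by
  rintro ⟨h1, hmod, hdiv⟩
  have hmb := m_bound S i j
  have hqr := PySem.Int.floordiv_mul_add_mod
    (min (min i j) (min (S - 1 - i) (S - 1 - j)) - 1) (sp + 1)
  rw [hmod, add_zero] at hqr
  have hql : (L - 1) * (sp + 1) ≤
      PySem.Int.floordiv (min (min i j) (min (S - 1 - i) (S - 1 - j)) - 1) (sp + 1) * (sp + 1) :=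
    mul_le_mul_of_nonpos_right (by omega) (by omega)
  have hexp : (L - 1) * (sp + 1) = L * (sp + 1) - (sp + 1) := by ring
  linarith

lemma pvSetCell_nil (r c : Int) (v : String) : pvSetCell [] r c v = [] := by
  simp [pvSetCell, PySem.List.pySetD, PySem.List.pySet?, PySem.List.pyIdx?]
  split_ifs <;> simp

lemma pvLayer_nil (sp S l : Int) : pvLayer sp S [] l = [] := by
  unfold pvLayer
  exact foldl_fix _ _ (fun i => by simp [pvDraw, pvSetCell_nil]) _

lemma pvLayer_id_d0 (sp S : Int) (g : List (List String)) (l : Int)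
    (hsp : sp + 1 = 0) (hS2 : S = 2) : pvLayer sp S g l = g := by
  unfold pvLayer
  rw [hsp, mul_zero, hS2]
  norm_num [PySem.List.pyRange_one_eq_nil]

lemma cellZ_getElem {g : List (List String)} (k k2 : Nat) (hk : k < g.length) (hk2 : k2 < g[k].length) :
    cellZ g (k : Int) (k2 : Int) = g[k][k2] := by
  unfold cellZ
  simp only [PySem.List.pyGetD_natCast]
  rw [List.getD_eq_getElem _ _ hk, List.getD_eq_getElem _ _ hk2]

lemma dot_shape (S : Int) (hS0 : 0 ≤ S) :
    PShape S ((PySem.List.pyRange 0 S 1).map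
      (fun _ => (PySem.List.pyRange 0 S 1).map (fun _ => ("." : String)))) := by
  constructor
  · simp [PySem.List.length_pyRange_one]; omega
  · intro row hrow
    obtain ⟨_, _, rfl⟩ := List.mem_map.mp hrow
    simp [PySem.List.length_pyRange_one]; omega

lemma dot_cell (S i j : Int) (hi0 : 0 ≤ i) (hiS : i < S) (hj0 : 0 ≤ j) (hjS : j < S) :
    cellZ ((PySem.List.pyRange 0 S 1).map
      (fun _ => (PySem.List.pyRange 0 S 1).map (fun _ => ("." : String)))) i j = "." := by
  unfold cellZ
  rw [PySem.List.pyGetD_eq_getElem _ _ hi0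
        (by simp [PySem.List.length_pyRange_one]; omega)]
  rw [List.getElem_map]
  rw [PySem.List.pyGetD_eq_getElem _ _ hj0
        (by simp [PySem.List.length_pyRange_one]; omega)]
  simp

-- A equals the per-cell closed form
lemma concentric_rooms_eq_plain (layers sp : Int) :
    concentric_rooms layers sp = pvPlain layers sp := by
  simp only [concentric_rooms, pvPlain]
  by_cases hd : 1 ≤ sp + 1
  · by_cases hL : 1 ≤ layers
    · -- main case
      have hP1 : (1:Int) ≤ layers * (sp + 1) := by
        calc (1:Int) = 1 * 1 := by ring
        _ ≤ layers * (sp + 1) := mul_le_mul hL hd (by norm_num) (by omega)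
      have hS0 : (0:Int) ≤ 2 + layers * (sp + 1) * 2 := by linarith
      obtain ⟨⟨hlen, hrows⟩, hchar⟩ :=
        outer_char sp layers (2 + layers * (sp + 1) * 2) hd rfl layers.toNat 0 _
          le_rfl (by omega) (dot_shape _ hS0)
      apply List.ext_getElem
      · have := hlen
        simp only [List.length_map, PySem.List.length_pyRange_one]
        omega
      · intro k h1 h2
        rw [List.getElem_map, PySem.List.getElem_pyRange_one]
        have hkS : (k : Int) < 2 + layers * (sp + 1) * 2 := by omega
        apply List.ext_getElem
        · have := hrows _ (List.getElem_mem h1)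
          simp only [PySem.List.length_pyRange_one, List.length_map]
          omega
        · intro k2 h3 h4
          rw [List.getElem_map, PySem.List.getElem_pyRange_one]
          have h5 := hrows _ (List.getElem_mem h1)
          have hk2S : (k2 : Int) < 2 + layers * (sp + 1) * 2 := by omega
          rw [← cellZ_getElem k k2 h1 h3]
          rw [hchar (k : Int) (k2 : Int) (by positivity) hkS (by positivity) hk2S]
          rw [dot_cell _ _ _ (by positivity) hkS (by positivity) hk2S]
          simp only [zero_add]
          refine if_congr ?_ rfl rfl
          rw [← exists_layer_iff (sp + 1) layers _ hd]
          constructor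
          · rintro ⟨l, hm, hMl⟩
            rw [PySem.List.mem_pyRange_one] at hm
            exact ⟨l, hm.1, hm.2, hMl⟩
          · rintro ⟨l, h0, hlL, hMl⟩
            exact ⟨l, by rw [PySem.List.mem_pyRange_one]; omega, hMl⟩
    · -- layers ≤ 0, spacing + 1 ≥ 1 : size ≤ 2, no walls
      have hP0 : layers * (sp + 1) ≤ 0 :=
        mul_nonpos_of_nonpos_of_nonneg (by omega) (by omega)
      rw [PySem.List.pyRange_one_eq_nil (show layers ≤ (0:Int) by omega)]
      simp only [List.foldl_nil]
      apply List.map_congr_left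
      intro i hi
      apply List.map_congr_left
      intro j hj
      rw [PySem.List.mem_pyRange_one] at hi hj
      rw [if_neg]
      rintro ⟨h1, _, _⟩
      have := m_bound (2 + layers * (sp + 1) * 2) i j
      linarith
  · by_cases hsp : sp + 1 = 0
    · -- spacing = -1 : size = 2, every layer loop body is empty
      have hS2 : 2 + layers * (sp + 1) * 2 = 2 := by rw [hsp]; ring
      rw [foldl_fix _ _ (fun l => pvLayer_id_d0 sp _ _ l hsp hS2)]
      apply List.map_congr_left
      intro i hi
      apply List.map_congr_left
      intro j hj
      rw [PySem.List.mem_pyRange_one] at hi hj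
      rw [if_neg]
      rintro ⟨h1, _, _⟩
      have := m_bound (2 + layers * (sp + 1) * 2) i j
      omega
    · by_cases hL : 1 ≤ layers
      · -- spacing + 1 ≤ -1, layers ≥ 1 : size ≤ 0, the grid is empty
        have hP : layers * (sp + 1) ≤ 1 * (sp + 1) :=
          mul_le_mul_of_nonpos_right hL (by omega)
        have hd' : sp + 1 ≤ -1 := by omega
        have hS0 : 2 + layers * (sp + 1) * 2 ≤ 0 := by linarith
        rw [PySem.List.pyRange_one_eq_nil hS0]
        simp only [List.map_nil]
        exact foldl_fix _ _ (pvLayer_nil sp _) _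
      · -- spacing + 1 ≤ -1, layers ≤ 0 : no walls pass the depth test
        rw [PySem.List.pyRange_one_eq_nil (show layers ≤ (0:Int) by omega)]
        simp only [List.foldl_nil]
        apply List.map_congr_left
        intro i hi
        apply List.map_congr_left
        intro j hj
        rw [PySem.List.mem_pyRange_one] at hi hj
        rw [if_neg]
        exact test_false_negd sp layers _ i j (by omega) rfl

-- B equals the per-cell closed form (the table w tabulates the test per depth)
lemma alt_eq_plain (layers sp : Int) :
    concentric_rooms_alt layers sp = pvPlain layers sp := by
  simp only [concentric_rooms_alt, pvPlain]
  apply List.map_congr_left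
  intro i hi
  rw [PySem.List.mem_pyRange_one] at hi
  rw [List.map_map]
  apply List.map_congr_left
  intro j hj
  rw [PySem.List.mem_pyRange_one] at hj
  simp only [Function.comp]
  have hw : ∀ m : Int, 0 ≤ m → m * 2 ≤ 2 + layers * (sp + 1) * 2 - 1 →
      PySem.List.pyGetD
        ((PySem.List.pyRange 0 (PySem.Int.floordiv (2 + layers * (sp + 1) * 2 + 1) 2) 1).map
          (fun m => if 1 ≤ m ∧ PySem.Int.mod (m - 1) (sp + 1) = 0 ∧
              PySem.Int.floordiv (m - 1) (sp + 1) < layers then "#" else ".")) m "." =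
      (if 1 ≤ m ∧ PySem.Int.mod (m - 1) (sp + 1) = 0 ∧
          PySem.Int.floordiv (m - 1) (sp + 1) < layers then "#" else ".") := by
    intro m h0 h2
    apply PySem.List.pyGetD_map_pyRange_of_nonneg _ _ _ _ h0
    rw [Int.lt_iff_add_one_le, PySem.Int.le_floordiv_iff_mul_le (by norm_num)]
    omega
  by_cases hc : min j (2 + layers * (sp + 1) * 2 - 1 - j) < min i (2 + layers * (sp + 1) * 2 - 1 - i)
  · rw [if_pos hc, hw _ (by omega) (by omega)]
    have hm : min (min i j)
        (min (2 + layers * (sp + 1) * 2 - 1 - i) (2 + layers * (sp + 1) * 2 - 1 - j)) =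
        min j (2 + layers * (sp + 1) * 2 - 1 - j) := by omega
    rw [hm]
  · rw [if_neg hc, hw _ (by omega) (by omega)]
    have hm : min (min i j)
        (min (2 + layers * (sp + 1) * 2 - 1 - i) (2 + layers * (sp + 1) * 2 - 1 - j)) =
        min i (2 + layers * (sp + 1) * 2 - 1 - i) := by omega
    rw [hm]

-- ===== VERDICT (by name: the statement is the Claim_ definition above) =====
theorem concentric_rooms_spec : Claim_equal_concentric_rooms := by
  intro layers layer_spacing _dom
  unfold Spec_concentric_rooms
  exact (concentric_rooms_eq_plain layers layer_spacing).trans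
    (alt_eq_plain layers layer_spacing).symm
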